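-- pv_equiv track=rewrite | github.com/neal-o-r/questions | only_unique.py | find_triple
-- ===== SOURCE A (Python) =====
-- def find_triple(arr):
--
--     one = 0
--     two = 0
--
--     for a in arr:
--         two |= one & a
--         one ^= a
--         both = ~(one & two)
--         one &= both
--         two &= both
--
--     return one
-- ===== SOURCE B (Python) =====
-- def find_triple(arr):
--     # Per-bit transverse counting: for each bit position, count how many
--     # elements have that bit set; a residue of 1 (mod 3) means the bit belongs
--     # to the answer.  The sign region (all bits above every operand's
--     # bit_length) is the count of negative elements mod 3.  The result is
--     # rebuilt by a Horner scan from the most significant bit down.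
--     W = max((x.bit_length() for x in arr), default=0) + 1
--     r = -1 if sum(x < 0 for x in arr) % 3 == 1 else 0
--     for i in reversed(range(W)):
--         bit = sum((x >> i) & 1 for x in arr) % 3 == 1
--         r = 2 * r + (1 if bit else 0)
--     return r
-- ===== Notes on version B (the rewrite author's own statement) =====
-- stated objective: alternative
-- what changed: A runs one pass over the elements maintaining a two-integer (ones, twos) bitwise mod-3 state machine; B instead counts, for each bit position up to the maximum bit length, how many elements have that bit set (and how many elements are negative for the sign region), keeps the positions whose count is 1 mod 3, and rebuilds the integer by a Horner scan from the top bit down.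
import Mathlib
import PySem

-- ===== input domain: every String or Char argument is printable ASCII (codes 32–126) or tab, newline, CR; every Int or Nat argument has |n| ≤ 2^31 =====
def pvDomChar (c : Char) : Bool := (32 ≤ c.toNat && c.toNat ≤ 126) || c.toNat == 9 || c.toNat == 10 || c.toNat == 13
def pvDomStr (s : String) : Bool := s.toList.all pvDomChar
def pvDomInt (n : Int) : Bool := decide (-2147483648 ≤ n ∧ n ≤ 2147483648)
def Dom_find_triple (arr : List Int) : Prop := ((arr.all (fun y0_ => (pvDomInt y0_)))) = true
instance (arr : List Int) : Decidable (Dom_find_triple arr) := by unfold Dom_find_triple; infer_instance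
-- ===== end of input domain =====

-- B replaces A's per-element (ones, twos) bitwise state machine by transverse per-bit
-- counting (count of set bits mod 3 per position, sign region = count of negatives mod 3,
-- Horner reconstruction); objective: alternative algorithm, not claimed faster.

-- ===== PORT A =====
-- loop body of A: two |= one & a; one ^= a; both = ~(one & two); one &= both; two &= both
def stepA (s : Int × Int) (a : Int) : Int × Int :=
  let two := PySem.Int.bor s.2 (PySem.Int.band s.1 a)
  let one := PySem.Int.bxor s.1 a
  let both := Int.not (PySem.Int.band one two)
  (PySem.Int.band one both, PySem.Int.band two both)

def find_triple (arr : List Int) : Int :=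
  (arr.foldl stepA (0, 0)).1

-- ===== PORT B =====
-- sum((x >> i) & 1 for x in arr)
def bitSum (arr : List Int) (i : Nat) : Int :=
  arr.foldl (fun (c : Int) (x : Int) => c + PySem.Int.band (x >>> i) 1) 0

def find_triple_alt (arr : List Int) : Int :=
  let W : Nat := (arr.foldl (fun m x => max m (PySem.Int.bitLength x)) 0) + 1
  let r0 : Int := if (arr.countP (fun x => decide (x < 0))) % 3 == 1 then -1 else 0
  (List.range W).reverse.foldl
    (fun (r : Int) (i : Nat) =>
      2 * r + (if PySem.Int.mod (bitSum arr i) 3 == 1 then 1 else 0))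
    r0

-- ===== PRECONDITION & SPEC =====
def Spec_find_triple (arr : List Int) (out : Int) : Prop := out = find_triple_alt arr
instance (arr : List Int) (out : Int) : Decidable (Spec_find_triple arr out) := by unfold Spec_find_triple; infer_instance

-- ===== CLAIM (what is proved, stated in full; the proofs are below) =====
def Claim_equal_find_triple : Prop := ∀ (arr : List Int), Dom_find_triple arr → Spec_find_triple arr (find_triple arr)

-- ===== LEMMAS AND PROOFS =====

-- Nat: subtracting the common bits is bitwise difference
theorem nat_sub_and (m : Nat) : ∀ n : Nat, m - (m &&& n) = m.ldiff n := by
  induction m using Nat.binaryRec with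
  | zero =>
    intro n
    simp [Nat.zero_and, Nat.ldiff, Nat.bitwise_zero_left]
  | bit b m IH =>
    intro n
    induction n using Nat.binaryRec with
    | zero =>
      simp [Nat.and_zero, Nat.ldiff, Nat.bitwise_zero_right]
    | bit c n' _ =>
      rw [Nat.land_bit, Nat.ldiff_bit]
      have h1 := IH n'
      have h2 : m &&& n' ≤ m := Nat.and_le_left
      cases b <;> cases c <;> simp [Nat.bit] <;> omega

theorem band_eq_land (a b : Int) : PySem.Int.band a b = Int.land a b := by
  cases a with
  | ofNat m =>
    cases b with
    | ofNat n => simp [PySem.Int.band, Int.land]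
    | negSucc n =>
      have h : (-(Int.negSucc n) - 1).toNat = n := by
        simp [Int.negSucc_eq]
      simp [PySem.Int.band, Int.land, Int.negSucc_not_nonneg, h, nat_sub_and]
  | negSucc m =>
    cases b with
    | ofNat n =>
      have h : (-(Int.negSucc m) - 1).toNat = m := by
        simp [Int.negSucc_eq]
      simp [PySem.Int.band, Int.land, Int.negSucc_not_nonneg, h, nat_sub_and]
    | negSucc n =>
      have hm : (-(Int.negSucc m) - 1).toNat = m := by simp [Int.negSucc_eq]
      have hn : (-(Int.negSucc n) - 1).toNat = n := by simp [Int.negSucc_eq]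
      simp [PySem.Int.band, Int.land, Int.negSucc_not_nonneg, hm, hn, Int.negSucc_eq]
      try omega

theorem bor_eq_lor (a b : Int) : PySem.Int.bor a b = Int.lor a b := by
  cases a with
  | ofNat m =>
    cases b with
    | ofNat n => simp [PySem.Int.bor, Int.lor]
    | negSucc n =>
      have h : (-(Int.negSucc n) - 1).toNat = n := by simp [Int.negSucc_eq]
      simp [PySem.Int.bor, Int.lor, Int.negSucc_not_nonneg, h, nat_sub_and, Int.negSucc_eq]
      try omega
  | negSucc m =>
    have hm : (-(Int.negSucc m) - 1).toNat = m := by simp [Int.negSucc_eq]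
    cases b with
    | ofNat n =>
      simp [PySem.Int.bor, Int.lor, Int.negSucc_not_nonneg, hm, nat_sub_and, Int.negSucc_eq]
      try omega
    | negSucc n =>
      have hn : (-(Int.negSucc n) - 1).toNat = n := by simp [Int.negSucc_eq]
      simp [PySem.Int.bor, Int.lor, Int.negSucc_not_nonneg, hm, hn, Int.negSucc_eq]
      try omega

theorem bxor_eq_xor (a b : Int) : PySem.Int.bxor a b = Int.xor a b := by
  cases a with
  | ofNat m =>
    cases b with
    | ofNat n => simp [PySem.Int.bxor, Int.xor]
    | negSucc n =>
      have h : (-(Int.negSucc n) - 1).toNat = n := by simp [Int.negSucc_eq]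
      simp [PySem.Int.bxor, Int.xor, Int.negSucc_not_nonneg, h, Int.negSucc_eq]
      try omega
  | negSucc m =>
    have hm : (-(Int.negSucc m) - 1).toNat = m := by simp [Int.negSucc_eq]
    cases b with
    | ofNat n =>
      simp [PySem.Int.bxor, Int.xor, Int.negSucc_not_nonneg, hm, Int.negSucc_eq]
      try omega
    | negSucc n =>
      have hn : (-(Int.negSucc n) - 1).toNat = n := by simp [Int.negSucc_eq]
      simp [PySem.Int.bxor, Int.xor, Int.negSucc_not_nonneg, hm, hn]

theorem not_eq_lnot (a : Int) : Int.not a = Int.lnot a := by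
  cases a <;> rfl

theorem tb_band (a b : Int) (k : Nat) :
    (PySem.Int.band a b).testBit k = (a.testBit k && b.testBit k) := by
  rw [band_eq_land, Int.testBit_land]

theorem tb_bor (a b : Int) (k : Nat) :
    (PySem.Int.bor a b).testBit k = (a.testBit k || b.testBit k) := by
  rw [bor_eq_lor, Int.testBit_lor]

theorem tb_bxor (a b : Int) (k : Nat) :
    (PySem.Int.bxor a b).testBit k = (xor (a.testBit k) (b.testBit k)) := by
  rw [bxor_eq_xor, Int.testBit_lxor]

theorem tb_not (a : Int) (k : Nat) :
    (Int.not a).testBit k = !a.testBit k := by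
  rw [not_eq_lnot, Int.testBit_lnot]

-- count of elements with bit k set
def bcnt (arr : List Int) (k : Nat) : Nat := arr.countP (fun x => x.testBit k)

-- invariant of A's fold: the state encodes each bit's count mod 3
theorem foldA_char (arr : List Int) : ∀ (o t : Int) (c : Nat → Nat),
    (∀ k, c k < 3) →
    (∀ k, o.testBit k = decide (c k = 1)) →
    (∀ k, t.testBit k = decide (c k = 2)) →
    ∀ k, ((arr.foldl stepA (o, t)).1.testBit k = decide ((c k + bcnt arr k) % 3 = 1))
       ∧ ((arr.foldl stepA (o, t)).2.testBit k = decide ((c k + bcnt arr k) % 3 = 2)) := by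
  induction arr with
  | nil =>
    intro o t c hc ho ht k
    have := hc k
    constructor
    · rw [List.foldl_nil, ho k]
      congr 1
      simp [bcnt]
      omega
    · rw [List.foldl_nil, ht k]
      congr 1
      simp [bcnt]
      omega
  | cons a arr IH =>
    intro o t c hc ho ht k
    rw [List.foldl_cons]
    have hstep1 : ∀ j, (stepA (o, t) a).1.testBit j
        = decide ((c j + (if a.testBit j then 1 else 0)) % 3 = 1) := by
      intro j
      simp only [stepA, tb_band, tb_bor, tb_bxor, tb_not, ho j, ht j]
      have := hc j
      rcases hcj : c j with _ | _ | _ | n <;> cases hab : a.testBit j <;> simp <;> omega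
    have hstep2 : ∀ j, (stepA (o, t) a).2.testBit j
        = decide ((c j + (if a.testBit j then 1 else 0)) % 3 = 2) := by
      intro j
      simp only [stepA, tb_band, tb_bor, tb_bxor, tb_not, ho j, ht j]
      have := hc j
      rcases hcj : c j with _ | _ | _ | n <;> cases hab : a.testBit j <;> simp <;> omega
    have hmain := IH (stepA (o, t) a).1 (stepA (o, t) a).2
      (fun j => (c j + (if a.testBit j then 1 else 0)) % 3)
      (fun j => Nat.mod_lt _ (by omega)) hstep1 hstep2 k
    have hb : bcnt (a :: arr) k = (if a.testBit k then 1 else 0) + bcnt arr k := by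
      simp [bcnt, List.countP_cons]
      cases a.testBit k <;> simp <;> omega
    have harith : ∀ r : Nat,
        ((c k + (if a.testBit k then 1 else 0)) % 3 + bcnt arr k) % 3 = r ↔
        (c k + bcnt (a :: arr) k) % 3 = r := by
      intro r
      rw [hb]
      cases a.testBit k <;> simp <;> omega
    constructor
    · rw [hmain.1, decide_eq_decide]
      exact harith 1
    · rw [hmain.2, decide_eq_decide]
      exact harith 2

-- bit characterisation of A's result
theorem A_char (arr : List Int) (k : Nat) :
    (find_triple arr).testBit k = decide (bcnt arr k % 3 = 1) := by
  have h := (foldA_char arr 0 0 (fun _ => 0) (fun k => by show (0:Nat) < 3; decide)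
    (fun j => by simp [Int.testBit]) (fun j => by simp [Int.testBit]) k).1
  simpa [find_triple] using h

-- (x >> i) & 1 is the bit i of x
theorem tb_emod (x : Int) (i : Nat) : x.testBit i = decide ((x >>> i) % 2 = 1) := by
  cases x with
  | ofNat n =>
    have hs : (Int.ofNat n) >>> i = Int.ofNat (n >>> i) := rfl
    have ht : (Int.ofNat n).testBit i = Nat.testBit n i := rfl
    have hn : Nat.testBit n i = decide ((n >>> i) % 2 = 1) := by simp [Nat.testBit]
    rw [hs, ht, hn, Int.ofNat_eq_coe, decide_eq_decide]
    generalize n >>> i = q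
    omega
  | negSucc n =>
    have hs : (Int.negSucc n) >>> i = Int.negSucc (n >>> i) := rfl
    have ht : (Int.negSucc n).testBit i = !Nat.testBit n i := rfl
    have hn : Nat.testBit n i = decide ((n >>> i) % 2 = 1) := by simp [Nat.testBit]
    rw [hs, ht, hn, Int.negSucc_eq]
    generalize n >>> i = q
    rcases Nat.mod_two_eq_zero_or_one q with h | h <;> simp [h] <;> omega

theorem fmod_two (a : Int) : Int.fmod a 2 = a % 2 := by
  rw [Int.fmod_eq_emod]
  simp

theorem bandShift (x : Int) (i : Nat) :
    PySem.Int.band (x >>> i) 1 = if x.testBit i then 1 else 0 := by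
  rw [PySem.Int.band_one]
  show Int.fmod (x >>> i) 2 = _
  rw [fmod_two, tb_emod]
  have h0 : 0 ≤ (x >>> i) % 2 := Int.emod_nonneg _ (by omega)
  have h1 : (x >>> i) % 2 < 2 := Int.emod_lt_of_pos _ (by omega)
  by_cases hc : (x >>> i) % 2 = 1 <;> simp [hc] <;> omega

theorem bitSum_eq (arr : List Int) (i : Nat) : bitSum arr i = (bcnt arr i : Int) := by
  have key : ∀ (l : List Int) (c0 : Int),
      l.foldl (fun (c : Int) (x : Int) => c + PySem.Int.band (x >>> i) 1) c0
        = c0 + (l.countP (fun x => x.testBit i) : Int) := by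
    intro l
    induction l with
    | nil => intro c0; simp
    | cons a l IH =>
      intro c0
      rw [List.foldl_cons, IH, bandShift, List.countP_cons]
      cases h : a.testBit i <;> simp [h] <;> ring
  simpa [bitSum, bcnt] using key arr 0

-- arithmetic shift halving with the extracted bit
theorem shift_halve (x : Int) (j : Nat) :
    x >>> j = 2 * (x >>> (j + 1)) + (if x.testBit j then 1 else 0) := by
  rw [tb_emod]
  have hd : x >>> (j + 1) = (x >>> j) / 2 := by
    rw [Int.shiftRight_eq_div_pow, Int.shiftRight_eq_div_pow,
      Int.ediv_ediv_of_nonneg (by positivity)]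
    congr 1
  rw [hd]
  have h0 : 0 ≤ (x >>> j) % 2 := Int.emod_nonneg _ (by omega)
  have h1 : (x >>> j) % 2 < 2 := Int.emod_lt_of_pos _ (by omega)
  by_cases hc : (x >>> j) % 2 = 1 <;> simp [hc] <;> omega

theorem lt_pow_of_high (W : Nat) : ∀ n : Nat, (∀ k, W ≤ k → n.testBit k = false) → n < 2 ^ W := by
  induction W with
  | zero =>
    intro n h
    have : n = 0 := Nat.zero_of_testBit_eq_false (fun i => h i (Nat.zero_le i))
    omega
  | succ W IH =>
    intro n h
    have hd : n / 2 < 2 ^ W := by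
      apply IH
      intro k hk
      rw [← Nat.testBit_succ]
      exact h (k + 1) (by omega)
    have : n = 2 * (n / 2) + n % 2 := by omega
    have hp : (2:Nat) ^ (W + 1) = 2 * 2 ^ W := by ring
    omega

theorem testBit_of_bitLength_le (x : Int) (k : Nat) (h : PySem.Int.bitLength x ≤ k) :
    x.testBit k = decide (x < 0) := by
  have hb := PySem.Int.lt_two_pow_bitLength x
  have hlt : x.natAbs < 2 ^ k :=
    lt_of_lt_of_le hb (Nat.pow_le_pow_right (by omega) h)
  cases x with
  | ofNat n =>
    have hn : n < 2 ^ k := by simpa using hlt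
    have : (Int.ofNat n).testBit k = Nat.testBit n k := rfl
    rw [this, Nat.testBit_eq_false_of_lt hn]
    simp
  | negSucc n =>
    have hn : n < 2 ^ k := by
      have : (Int.negSucc n).natAbs = n + 1 := rfl
      omega
    have : (Int.negSucc n).testBit k = !Nat.testBit n k := rfl
    rw [this, Nat.testBit_eq_false_of_lt hn]
    simp [Int.negSucc_eq]
    omega

theorem shift_past (R : Int) (W : Nat) (s : Bool)
    (h : ∀ k, W ≤ k → R.testBit k = s) :
    R >>> W = if s then -1 else 0 := by
  cases R with
  | ofNat n =>
    have hfalse : s = false := by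
      have h1 := h (W + n) (by omega)
      have h2 : (Int.ofNat n).testBit (W + n) = Nat.testBit n (W + n) := rfl
      have h3 : Nat.testBit n (W + n) = false :=
        Nat.testBit_eq_false_of_lt
          (lt_of_lt_of_le Nat.lt_two_pow_self (Nat.pow_le_pow_right (by omega) (by omega)))
      rw [h2, h3] at h1
      exact h1.symm
    subst hfalse
    have hn : n < 2 ^ W := by
      apply lt_pow_of_high
      intro k hk
      have := h k hk
      exact this
    have h0 : n >>> W = 0 := by
      rw [Nat.shiftRight_eq_div_pow]
      exact Nat.div_eq_of_lt hn
    have : (Int.ofNat n) >>> W = Int.ofNat (n >>> W) := rfl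
    rw [this, h0]
    rfl
  | negSucc n =>
    have htrue : s = true := by
      have h1 := h (W + n) (by omega)
      have h2 : (Int.negSucc n).testBit (W + n) = !Nat.testBit n (W + n) := rfl
      have h3 : Nat.testBit n (W + n) = false :=
        Nat.testBit_eq_false_of_lt
          (lt_of_lt_of_le Nat.lt_two_pow_self (Nat.pow_le_pow_right (by omega) (by omega)))
      rw [h2, h3] at h1
      simpa using h1.symm
    subst htrue
    have hn : n < 2 ^ W := by
      apply lt_pow_of_high
      intro k hk
      have h1 := h k hk
      have h2 : (Int.negSucc n).testBit k = !Nat.testBit n k := rfl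
      rw [h2] at h1
      cases hx : Nat.testBit n k
      · rfl
      · rw [hx] at h1; simp at h1
    have h0 : n >>> W = 0 := by
      rw [Nat.shiftRight_eq_div_pow]
      exact Nat.div_eq_of_lt hn
    have : (Int.negSucc n) >>> W = Int.negSucc (n >>> W) := rfl
    rw [this, h0]
    rfl

-- Horner reconstruction from the shifted value
theorem horner (R : Int) (f : Nat → Bool) (hf : ∀ i, f i = R.testBit i) :
    ∀ j : Nat, (List.range j).reverse.foldl
      (fun (r : Int) (i : Nat) => 2 * r + (if f i then 1 else 0)) (R >>> j) = R := by
  intro j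
  induction j with
  | zero => simp
  | succ j IH =>
    rw [List.range_succ, List.reverse_append]
    simp only [List.reverse_singleton, List.singleton_append, List.foldl_cons]
    have : 2 * (R >>> (j + 1)) + (if f j then 1 else 0) = R >>> j := by
      rw [hf j, ← shift_halve]
    rw [this, IH]

theorem foldl_max_start_le (arr : List Int) : ∀ m0 : Nat,
    m0 ≤ arr.foldl (fun m x => max m (PySem.Int.bitLength x)) m0 := by
  induction arr with
  | nil => intro m0; simp
  | cons a arr IH =>
    intro m0
    rw [List.foldl_cons]
    exact le_trans (le_max_left _ _) (IH _)

theorem foldl_max_mem_le (arr : List Int) : ∀ (m0 : Nat) (x : Int), x ∈ arr →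
    PySem.Int.bitLength x ≤ arr.foldl (fun m x => max m (PySem.Int.bitLength x)) m0 := by
  induction arr with
  | nil => intro _ x hx; cases hx
  | cons a arr IH =>
    intro m0 x hx
    rw [List.foldl_cons]
    rcases List.mem_cons.mp hx with h | h
    · subst h
      exact le_trans (le_max_right _ _) (foldl_max_start_le arr _)
    · exact IH _ x h

theorem mod_natCast_three (n : Nat) : PySem.Int.mod (n : Int) 3 = ((n % 3 : Nat) : Int) := by
  show Int.fmod (n : Int) 3 = _
  rw [Int.fmod_eq_emod]
  simp

-- ===== VERDICT (by name: the statement is the Claim_ definition above) =====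
theorem find_triple_spec : Claim_equal_find_triple := by
  intro arr _
  show find_triple arr = find_triple_alt arr
  have hbeq : ∀ m : Nat, (((m : Int)) == 1) = decide (m = 1) := by
    intro m
    by_cases h : m = 1 <;> simp [h]
  have hf : ∀ i : Nat,
      (PySem.Int.mod (bitSum arr i) 3 == 1) = (find_triple arr).testBit i := by
    intro i
    rw [bitSum_eq, mod_natCast_three, A_char, hbeq]
  have hr0 : (if (arr.countP (fun x => decide (x < 0))) % 3 == 1 then (-1 : Int) else 0)
      = find_triple arr >>> ((arr.foldl (fun m x => max m (PySem.Int.bitLength x)) 0) + 1) := by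
    rw [shift_past (find_triple arr) _ ((arr.countP (fun x => decide (x < 0))) % 3 == 1)]
    · intro k hk
      have hcnt : bcnt arr k = arr.countP (fun x => decide (x < 0)) := by
        apply List.countP_congr
        intro x hx
        have hbl : PySem.Int.bitLength x ≤ k :=
          le_trans (le_trans (foldl_max_mem_le arr 0 x hx) (by omega)) hk
        simp [testBit_of_bitLength_le x k hbl]
      rw [A_char, hcnt]
      by_cases h : (arr.countP (fun x => decide (x < 0))) % 3 = 1 <;> simp [h]
  have hh := horner (find_triple arr)
      (fun i => (PySem.Int.mod (bitSum arr i) 3 == 1)) hf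
      ((arr.foldl (fun m x => max m (PySem.Int.bitLength x)) 0) + 1)
  rw [← hr0] at hh
  simp only [find_triple_alt]
  exact hh.symm
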